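-- pv_equiv track=rewrite | github.com/rlrq/MINORg | minorg/functions.py | pos_to_ranges
-- ===== SOURCE A (Python) =====
-- def pos_to_ranges(pos) -> list:
--     """
--     Convert an iterable of integer positions to range(s).
--     E.g. pos_to_range({1, 2, 6, 7, 8, 9}) --> [(1, 3), (6, 10)]
--
--     Arguments:
--         pos (iterable): iterable of integer positions
--
--     Returns
--     -------
--     list
--         Of 0-index, start-inclusive, end-exclusive ranges
--     """
--     if not pos: return []
--     pos = sorted(set(pos))
--     output = []
--     start_v = pos[0]
--     last_v = pos[0] - 1
--     for i in range(len(pos)):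
--         v = pos[i]
--         if v - last_v != 1:
--             output.append((start_v, last_v + 1))
--             start_v = v
--         if i == len(pos) - 1:
--             output.append((start_v, v + 1))
--         last_v = v
--     return output
-- ===== SOURCE B (Python) =====
-- def pos_to_ranges(pos) -> list:
--     """
--     Convert an iterable of integer positions to range(s).
--     Idiomatic rewrite: derive range starts and ends from consecutive-pair
--     breaks over the sorted deduplicated positions, instead of a running-state loop.
--     """
--     if not pos: return []
--     s = sorted(set(pos))
--     starts = [s[0]] + [b for a, b in zip(s, s[1:]) if b - a != 1]
--     ends = [a + 1 for a, b in zip(s, s[1:]) if b - a != 1] + [s[-1] + 1]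
--     return list(zip(starts, ends))
-- ===== Notes on version B (the rewrite author's own statement) =====
-- stated objective: idiomatic
-- what changed: Replaced the index-based running-state loop (start_v/last_v, last-index test) by deriving range starts and ends declaratively from consecutive-pair breaks in zip(s, s[1:]) and zipping them together.
import Mathlib
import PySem

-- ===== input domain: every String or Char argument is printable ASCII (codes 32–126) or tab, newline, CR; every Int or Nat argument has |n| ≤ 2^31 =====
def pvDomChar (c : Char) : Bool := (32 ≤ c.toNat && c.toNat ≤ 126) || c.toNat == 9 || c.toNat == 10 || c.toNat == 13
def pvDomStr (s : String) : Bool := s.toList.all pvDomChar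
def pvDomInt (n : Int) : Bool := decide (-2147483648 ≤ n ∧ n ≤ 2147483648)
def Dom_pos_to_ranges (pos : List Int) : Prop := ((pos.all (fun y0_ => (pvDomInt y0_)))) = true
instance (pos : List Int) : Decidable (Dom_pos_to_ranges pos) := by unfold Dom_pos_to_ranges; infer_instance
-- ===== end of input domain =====

-- B replaces A's running-state index loop with a declarative starts/ends-from-breaks
-- construction over zip(s, s[1:]); same values, same cost (idiomatic rewrite).

-- ===== PORT A =====
-- literal port of A: guard, s = sorted(set(pos)), then the index loop over range(len(s))
-- carrying (output, start_v, last_v); s[i]/s[0] via pyGetD (indices provably in range).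
def pos_to_ranges (pos : List Int) : List (Int × Int) :=
  if pos = [] then []
  else
    let s := PySem.List.sorted (PySem.Set.ofList pos) (fun x => x) false
    let start_v := PySem.List.pyGetD s 0 0
    let last_v := start_v - 1
    let r := (PySem.List.pyRange 0 (s.length : Int) 1).foldl
      (fun (acc : List (Int × Int) × Int × Int) i =>
        let v := PySem.List.pyGetD s i 0
        let acc1 : List (Int × Int) × Int :=
          if v - acc.2.2 ≠ 1 then (acc.1 ++ [(acc.2.1, acc.2.2 + 1)], v) else (acc.1, acc.2.1)
        ((if i = (s.length : Int) - 1 then acc1.1 ++ [(acc1.2, v + 1)] else acc1.1), acc1.2, v))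
      ([], start_v, last_v)
    r.1

-- ===== PORT B =====
-- literal port of Source B: starts = [s[0]] + breaks' seconds, ends = breaks' firsts + 1 ++ [s[-1]+1]
def pos_to_ranges_alt (pos : List Int) : List (Int × Int) :=
  if pos = [] then []
  else
    let s := PySem.List.sorted (PySem.Set.ofList pos) (fun x => x) false
    let pairs := s.zip (PySem.List.slice s (some 1) none)
    let starts := PySem.List.pyGetD s 0 0 ::
      (pairs.filter (fun p => p.2 - p.1 ≠ 1)).map (fun p => p.2)
    let ends := (pairs.filter (fun p => p.2 - p.1 ≠ 1)).map (fun p => p.1 + 1) ++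
      [PySem.List.pyGetD s (-1) 0 + 1]
    starts.zip ends

-- ===== PRECONDITION & SPEC =====
def Spec_pos_to_ranges (pos : List Int) (out : List (Int × Int)) : Prop := out = pos_to_ranges_alt pos
instance (pos : List Int) (out : List (Int × Int)) : Decidable (Spec_pos_to_ranges pos out) := by unfold Spec_pos_to_ranges; infer_instance

-- ===== CLAIM (what is proved, stated in full; the proofs are below) =====
def Claim_equal_pos_to_ranges : Prop := ∀ (pos : List Int), Dom_pos_to_ranges pos → Spec_pos_to_ranges pos (pos_to_ranges pos)

-- ===== LEMMAS AND PROOFS =====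

-- A's loop body, with the final-index test abstracted to a Bool flag.
def stepA (acc : List (Int × Int) × Int × Int) (v : Int) (isLast : Bool) :
    List (Int × Int) × Int × Int :=
  let acc1 : List (Int × Int) × Int :=
    if v - acc.2.2 ≠ 1 then (acc.1 ++ [(acc.2.1, acc.2.2 + 1)], v) else (acc.1, acc.2.1)
  ((if isLast then acc1.1 ++ [(acc1.2, v + 1)] else acc1.1), acc1.2, v)

-- A's loop as structural recursion over the remaining elements.
def goA (acc : List (Int × Int) × Int × Int) : List Int → List (Int × Int) × Int × Int
  | [] => acc
  | v :: t => goA (stepA acc v (decide (t = []))) t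

-- the common shape both ports compute: maximal runs as (start, last+1) pairs
def R (start v : Int) : List Int → List (Int × Int)
  | [] => [(start, v + 1)]
  | w :: t => if w - v ≠ 1 then (start, v + 1) :: R w w t else R start w t

theorem foldA_eq (s : List Int) :
    ∀ (l : List Int) (j : Nat) (acc : List (Int × Int) × Int × Int),
    s.drop j = l →
    (PySem.List.pyRange (j : Int) (s.length : Int) 1).foldl
      (fun (acc : List (Int × Int) × Int × Int) i =>
        let v := PySem.List.pyGetD s i 0
        let acc1 : List (Int × Int) × Int :=
          if v - acc.2.2 ≠ 1 then (acc.1 ++ [(acc.2.1, acc.2.2 + 1)], v) else (acc.1, acc.2.1)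
        ((if i = (s.length : Int) - 1 then acc1.1 ++ [(acc1.2, v + 1)] else acc1.1), acc1.2, v))
      acc = goA acc l := by
  intro l
  induction l with
  | nil =>
    intro j acc hdrop
    have hj : s.length ≤ j := by
      by_contra h
      have := List.drop_eq_nil_iff.mp hdrop
      omega
    rw [PySem.List.pyRange_one_eq_nil (by exact_mod_cast hj)]
    simp [goA]
  | cons v t ih =>
    intro j acc hdrop
    have hj : j < s.length := by
      by_contra h
      rw [List.drop_eq_nil_of_le (by omega)] at hdrop
      simp at hdrop
    have hd : s.drop (j + 1) = t := by
      have := congrArg (List.drop 1) hdrop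
      simpa [List.drop_drop, Nat.add_comm] using this
    have hv : PySem.List.pyGetD s (j : Int) 0 = v := by
      have h1 : s[j]? = some v := by
        have : (s.drop j)[0]? = some v := by rw [hdrop]; rfl
        simpa using this
      rw [PySem.List.pyGetD_natCast]
      simp [List.getD, h1]
    rw [PySem.List.pyRange_one_cons (by exact_mod_cast hj), List.foldl_cons]
    have hcast : ((j : Int) + 1) = ((j + 1 : Nat) : Int) := by push_cast; ring
    rw [hcast, ih (j + 1) _ hd]
    show goA _ t = goA (stepA acc v (decide (t = []))) t
    congr 1
    simp only [hv, stepA]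
    rcases ht : t with _ | ⟨w, t'⟩
    · have hjl : (j : Int) = (s.length : Int) - 1 := by
        rw [ht] at hd
        have := List.drop_eq_nil_iff.mp hd
        omega
      simp [hjl]
    · have hjl : ¬ ((j : Int) = (s.length : Int) - 1) := by
        have : j + 1 < s.length := by
          by_contra h
          rw [List.drop_eq_nil_of_le (by omega)] at hd
          rw [ht] at hd
          simp at hd
        omega
      simp [hjl]

theorem goA_char : ∀ (l : List Int) (out : List (Int × Int)) (start v : Int), l ≠ [] →
    (goA (out, start, v) l).1 = out ++ R start v l := by
  intro l
  induction l with
  | nil => intro _ _ _ h; exact absurd rfl h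
  | cons w t ih =>
    intro out start v _
    rw [show goA (out, start, v) (w :: t) = goA (stepA (out, start, v) w (decide (t = []))) t
      from rfl]
    rcases t with _ | ⟨u, t'⟩
    · by_cases h : w - v ≠ 1 <;> simp [goA, stepA, h, R]
    · rw [show (decide ((u :: t' : List Int) = [])) = false from rfl]
      by_cases h : w - v ≠ 1
      · rw [show stepA (out, start, v) w false = (out ++ [(start, v + 1)], w, w) by
          simp [stepA, h]]
        rw [ih _ _ _ (by simp)]
        rw [show R start v (w :: u :: t') = if w - v ≠ 1 then (start, v + 1) :: R w w (u :: t')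
          else R start w (u :: t') from rfl, if_pos h]
        simp
      · rw [show stepA (out, start, v) w false = (out, start, w) by simp [stepA, h]]
        rw [ih _ _ _ (by simp)]
        rw [show R start v (w :: u :: t') = if w - v ≠ 1 then (start, v + 1) :: R w w (u :: t')
          else R start w (u :: t') from rfl, if_neg h]

-- B's starts/ends/zip construction equals R, with the closing end tied to the last element.
theorem B_char : ∀ (t : List Int) (s0 start : Int),
    List.zip (start :: ((((s0 :: t).zip t).filter (fun p => decide (p.2 - p.1 ≠ 1))).map (fun p => p.2)))
      (((((s0 :: t).zip t).filter (fun p => decide (p.2 - p.1 ≠ 1))).map (fun p => p.1 + 1)) ++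
        [(s0 :: t).getLast (by simp) + 1]) =
    R start s0 t := by
  intro t
  induction t with
  | nil => intro s0 start; simp [R]
  | cons w t' ih =>
    intro s0 start
    rw [List.getLast_cons (by simp)]
    have hz : ((s0 :: w :: t').zip (w :: t')) = (s0, w) :: ((w :: t').zip t') := rfl
    rw [hz]
    by_cases h : w - s0 ≠ 1
    · simp only [List.filter_cons]
      rw [if_pos (by simp [h])]
      simp only [List.map_cons, List.cons_append, List.zip_cons_cons]
      rw [ih w w]
      rw [show R start s0 (w :: t') = if w - s0 ≠ 1 then (start, s0 + 1) :: R w w t'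
        else R start w t' from rfl, if_pos h]
    · simp only [List.filter_cons]
      rw [if_neg (by simp [h])]
      rw [ih w start]
      rw [show R start s0 (w :: t') = if w - s0 ≠ 1 then (start, s0 + 1) :: R w w t'
        else R start w t' from rfl, if_neg h]

theorem pyGetD_zero_cons (a : Int) (l : List Int) (d : Int) :
    PySem.List.pyGetD (a :: l) 0 d = a := by
  simp [PySem.List.pyGetD, PySem.List.pyGet?, PySem.List.pyIdx?]

theorem pyGetD_neg_one_getLast (s : List Int) (h : s ≠ []) :
    PySem.List.pyGetD s (-1) 0 = s.getLast h := by
  have hl : 1 ≤ s.length := List.length_pos_of_ne_nil h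
  have hlt : s.length - 1 < s.length := by omega
  simp [PySem.List.pyGetD, PySem.List.pyGet?, PySem.List.pyIdx?, hl,
    List.getElem?_eq_getElem hlt, List.getLast_eq_getElem]

theorem sorted_ne_nil (pos : List Int) (h : pos ≠ []) :
    PySem.List.sorted (PySem.Set.ofList pos) (fun x => x) false ≠ [] := by
  intro hc
  have h0 := (PySem.List.sorted_eq_nil_iff _ _ _).mp hc
  rcases pos with _ | ⟨x, t⟩
  · exact h rfl
  · have : x ∈ PySem.Set.ofList (x :: t) := by
      rw [PySem.Set.mem_ofList]; simp
    rw [h0] at this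
    simp at this

-- A as goA over the sorted deduplicated list (the loop-to-recursion step, by foldA_eq)
theorem A_eq_goA (pos : List Int) (hp : pos ≠ []) :
    pos_to_ranges pos =
      (goA ([], PySem.List.pyGetD (PySem.List.sorted (PySem.Set.ofList pos) (fun x => x) false) 0 0,
            PySem.List.pyGetD (PySem.List.sorted (PySem.Set.ofList pos) (fun x => x) false) 0 0 - 1)
        (PySem.List.sorted (PySem.Set.ofList pos) (fun x => x) false)).1 := by
  unfold pos_to_ranges
  rw [if_neg hp]
  exact congrArg Prod.fst
    (foldA_eq (PySem.List.sorted (PySem.Set.ofList pos) (fun x => x) false)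
      (PySem.List.sorted (PySem.Set.ofList pos) (fun x => x) false) 0 _ (by simp))

-- ===== VERDICT (by name: the statement is the Claim_ definition above) =====
theorem pos_to_ranges_spec : Claim_equal_pos_to_ranges := by
  intro pos _
  unfold Spec_pos_to_ranges
  by_cases hp : pos = []
  · simp [hp, pos_to_ranges, pos_to_ranges_alt]
  · rw [A_eq_goA pos hp]
    unfold pos_to_ranges_alt
    rw [if_neg hp]
    have hsne : PySem.List.sorted (PySem.Set.ofList pos) (fun x => x) false ≠ [] :=
      sorted_ne_nil pos hp
    rcases hse : PySem.List.sorted (PySem.Set.ofList pos) (fun x => x) false with _ | ⟨s0, t⟩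
    · exact absurd hse hsne
    · rw [pyGetD_zero_cons, goA_char (s0 :: t) [] s0 (s0 - 1) (by simp), List.nil_append]
      rw [show R s0 (s0 - 1) (s0 :: t) = if s0 - (s0 - 1) ≠ 1 then
        (s0, (s0 - 1) + 1) :: R s0 s0 t else R s0 s0 t from rfl, if_neg (by omega)]
      show R s0 s0 t =
        List.zip (PySem.List.pyGetD (s0 :: t) 0 0 ::
            (((s0 :: t).zip (PySem.List.slice (s0 :: t) (some 1) none)).filter
              (fun p => decide (p.2 - p.1 ≠ 1))).map (fun p => p.2))
          ((((s0 :: t).zip (PySem.List.slice (s0 :: t) (some 1) none)).filter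
              (fun p => decide (p.2 - p.1 ≠ 1))).map (fun p => p.1 + 1) ++
            [PySem.List.pyGetD (s0 :: t) (-1) 0 + 1])
      rw [PySem.List.slice_from (xs := s0 :: t) (a := 1) (by omega)]
      rw [show List.drop (1:Int).toNat (s0 :: t) = t from rfl]
      rw [pyGetD_zero_cons, pyGetD_neg_one_getLast (s0 :: t) (by simp)]
      exact (B_char t s0 s0).symm
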